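-- pv_equiv track=rewrite | github.com/keve23z/PTTKTT_LCS_ChoThueMay | Buoi03_2001220867_NguyenVuongHongDao.py | tim_max_chan
-- ===== SOURCE A (Python) =====
-- def tim_max_chan(mang, n):
--     if n < 0:
--         return None
--     max_cua_phan_con_lai = tim_max_chan(mang, n - 1)
--
--     if mang[n] % 2 == 0:
--         if max_cua_phan_con_lai is None or mang[n] > max_cua_phan_con_lai:
--             return mang[n]
--
--     return max_cua_phan_con_lai
-- ===== SOURCE B (Python) =====
-- def tim_max_chan(mang, n):
--     if n < 0:
--         return None
--     result = None
--     for i in range(n + 1):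
--         if mang[i] % 2 == 0:
--             if result is None or mang[i] > result:
--                 result = mang[i]
--     return result
-- ===== Notes on version B (the rewrite author's own statement) =====
-- stated objective: simpler
-- what changed: Replaced the right-to-left recursion over the prefix with a single iterative left-to-right loop maintaining a running best even value; no recursion, O(1) extra space and no recursion-depth limit.
import Mathlib
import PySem

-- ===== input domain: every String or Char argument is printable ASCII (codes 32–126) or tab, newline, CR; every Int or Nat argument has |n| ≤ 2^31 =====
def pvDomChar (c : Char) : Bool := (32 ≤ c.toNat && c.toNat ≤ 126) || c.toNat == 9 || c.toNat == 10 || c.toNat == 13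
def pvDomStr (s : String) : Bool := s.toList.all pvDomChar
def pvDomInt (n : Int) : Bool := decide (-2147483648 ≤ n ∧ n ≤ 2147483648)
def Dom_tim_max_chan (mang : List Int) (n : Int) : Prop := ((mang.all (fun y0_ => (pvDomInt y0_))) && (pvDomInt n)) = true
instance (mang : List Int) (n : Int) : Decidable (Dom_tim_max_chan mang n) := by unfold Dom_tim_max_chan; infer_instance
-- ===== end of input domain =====

-- B replaces A's right-to-left recursion over the prefix with a single iterative
-- left-to-right loop carrying a running best even value (simpler, no recursion).

-- ===== PORT A =====
-- one unfolding of A's body at index k with the recursive result `rest`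
def timA_step (mang : List Int) (k : Nat) (rest : Option Int) : Option Int :=
  match PySem.List.pyGet? mang (k : Int) with
  | none => none      -- mang[n] raises IndexError in Python; excluded by Pre_
  | some v =>
    if PySem.Int.mod v 2 = 0 then
      match rest with
      | none => some v
      | some m => if v > m then some v else rest
    else rest

def timA_go (mang : List Int) : Nat → Option Int
  | 0 => timA_step mang 0 none
  | k+1 => timA_step mang (k+1) (timA_go mang k)

def tim_max_chan (mang : List Int) (n : Int) : Option Int :=
  if n < 0 then none else timA_go mang n.toNat

-- ===== PORT B =====
-- loop body of B: update the running best even value `result` with mang[i]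
def timB_step (mang : List Int) (result : Option Int) (i : Int) : Option Int :=
  match PySem.List.pyGet? mang i with
  | none => result    -- mang[i] raises IndexError in Python; excluded by Pre_
  | some v =>
    if PySem.Int.mod v 2 = 0 then
      match result with
      | none => some v
      | some m => if v > m then some v else result
    else result

def tim_max_chan_alt (mang : List Int) (n : Int) : Option Int :=
  if n < 0 then none
  else (PySem.List.pyRange 0 (n + 1) 1).foldl (timB_step mang) none

-- ===== PRECONDITION & SPEC =====
-- Pre_ excludes exactly the inputs where A raises IndexError: 0 ≤ n but n ≥ len(mang)
def Pre_tim_max_chan (mang : List Int) (n : Int) : Prop := n < (mang.length : Int)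
instance (mang : List Int) (n : Int) : Decidable (Pre_tim_max_chan mang n) := by unfold Pre_tim_max_chan; infer_instance
def pvWitness_tim_max_chan : List Int × Int := ([2, 3, 4], 2)

def Spec_tim_max_chan (mang : List Int) (n : Int) (out : Option Int) : Prop := out = tim_max_chan_alt mang n
instance (mang : List Int) (n : Int) (out : Option Int) : Decidable (Spec_tim_max_chan mang n out) := by unfold Spec_tim_max_chan; infer_instance

-- ===== CLAIM (what is proved, stated in full; the proofs are below) =====
def Claim_equal_tim_max_chan : Prop := ∀ (mang : List Int) (n : Int), Dom_tim_max_chan mang n → Pre_tim_max_chan mang n → Spec_tim_max_chan mang n (tim_max_chan mang n)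

-- ===== LEMMAS AND PROOFS =====

-- when the index is in range, one unfolding of A equals one loop step of B
theorem step_eq (mang : List Int) (k : Nat) (r : Option Int) (h : k < mang.length) :
    timA_step mang k r = timB_step mang r (k : Int) := by
  simp [timA_step, timB_step, PySem.List.pyGet?_natCast, List.getElem?_eq_getElem h]

theorem go_eq_foldl (mang : List Int) (k : Nat) (h : k < mang.length) :
    timA_go mang k = (PySem.List.pyRange 0 ((k : Int) + 1) 1).foldl (timB_step mang) none := by
  induction k with
  | zero =>
    rw [show ((0 : Nat) : Int) + 1 = 0 + 1 by norm_num, PySem.List.pyRange_one_singleton]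
    simpa [timA_go, List.foldl] using step_eq mang 0 none h
  | succ j ih =>
    rw [show ((j + 1 : Nat) : Int) + 1 = ((j : Int) + 1) + 1 by push_cast; ring,
        PySem.List.pyRange_one_succ_right (show (0:Int) ≤ (j : Int) + 1 by omega),
        List.foldl_append]
    have hj : j < mang.length := Nat.lt_of_succ_lt h
    simp only [timA_go, ih hj, List.foldl]
    rw [step_eq mang (j + 1) _ h]
    push_cast
    ring_nf

-- ===== VERDICT (by name: the statement is the Claim_ definition above) =====
theorem tim_max_chan_spec : Claim_equal_tim_max_chan := by
  intro mang n _ hpre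
  unfold Spec_tim_max_chan tim_max_chan tim_max_chan_alt
  by_cases hn : n < 0
  · simp [hn]
  · simp only [hn]
    have h0 : 0 ≤ n := le_of_not_gt hn
    have hk : n.toNat < mang.length := by
      unfold Pre_tim_max_chan at hpre; omega
    have := go_eq_foldl mang n.toNat hk
    rwa [Int.toNat_of_nonneg h0] at this
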